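-- pv_equiv track=rewrite | github.com/logan2139652/01_test | src/scheduling/state_of_art/q_learning_greedy/greedy_tool.py | enter_schedule_list
-- ===== SOURCE A (Python) =====
-- def enter_schedule_list(through_slot, offset, slotnum, flownum, pktnum, pkthop, flow_name, schedule_list, switchid):
--     """
--     输入flow所有数据包至调度表
--     :param through_slot:路径时隙
--     :param current_offset:当前offset
--     :param slotnum: 时隙数
--     :param flownum: 当前流量num
--     :param pktnum:流量数据包数量
--     :param pkthop:流量数据包跳数
--     :param flow_name:存有流量名称的列表
--     :param schedule_list:调度表
--     :param switchid:交换机id列表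
--     :return:
--     """
--     basic_offset = offset
--     for j in range(pktnum):
--         pkt = flow_name[flownum] + '.' + str(j)
--         offset = int((basic_offset + j * pkthop) % slotnum)
--         temp = offset
--         for k in range(len(through_slot)):
--             temp = int((temp + through_slot[k]) % slotnum)
--             schedule_list[switchid[k]][temp].append(pkt)
--     return schedule_list
-- ===== SOURCE B (Python) =====
-- def enter_schedule_list(through_slot, offset, slotnum, flownum, pktnum, pkthop, flow_name, schedule_list, switchid):
--     # Prefix-sum table of the path delays, then a closed-form slot for each
--     # (packet, hop) pair: no running offset is carried through the inner loop.
--     cum = []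
--     total = 0
--     for hop in through_slot:
--         total += hop
--         cum.append(total)
--     for j in range(pktnum):
--         pkt = flow_name[flownum] + '.' + str(j)
--         base = offset + j * pkthop
--         for k, c in enumerate(cum):
--             schedule_list[switchid[k]][(base + c) % slotnum].append(pkt)
--     return schedule_list
-- ===== Notes on version B (the rewrite author's own statement) =====
-- stated objective: alternative
-- what changed: Replaces A's inner loop that carries a running offset through a chain of per-hop modulo reductions by a once-computed prefix-sum table of through_slot and a closed-form slot index (base + cum[k]) % slotnum per (packet, hop) pair, so the inner loop maintains no state; …
import Mathlib
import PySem

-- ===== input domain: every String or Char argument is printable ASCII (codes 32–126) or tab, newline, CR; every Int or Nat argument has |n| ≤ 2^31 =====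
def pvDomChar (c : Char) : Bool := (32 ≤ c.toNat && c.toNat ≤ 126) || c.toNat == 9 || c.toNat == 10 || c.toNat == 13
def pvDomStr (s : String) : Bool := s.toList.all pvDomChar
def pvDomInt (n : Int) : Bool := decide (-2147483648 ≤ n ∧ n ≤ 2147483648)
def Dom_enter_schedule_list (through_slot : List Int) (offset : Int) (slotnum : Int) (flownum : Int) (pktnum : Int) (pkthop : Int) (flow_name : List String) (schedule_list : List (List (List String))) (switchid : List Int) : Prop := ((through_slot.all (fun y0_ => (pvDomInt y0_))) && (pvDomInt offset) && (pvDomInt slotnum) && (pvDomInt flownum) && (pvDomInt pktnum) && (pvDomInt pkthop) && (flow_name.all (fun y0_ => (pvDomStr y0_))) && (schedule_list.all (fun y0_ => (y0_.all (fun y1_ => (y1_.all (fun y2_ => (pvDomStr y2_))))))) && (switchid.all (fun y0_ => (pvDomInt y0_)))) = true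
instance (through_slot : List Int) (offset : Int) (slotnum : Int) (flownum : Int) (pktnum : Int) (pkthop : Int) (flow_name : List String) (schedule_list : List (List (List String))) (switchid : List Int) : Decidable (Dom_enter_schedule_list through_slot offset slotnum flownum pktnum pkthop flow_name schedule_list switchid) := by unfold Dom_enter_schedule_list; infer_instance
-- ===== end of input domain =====

-- B precomputes a prefix-sum table of through_slot and derives every slot by one closed-form
-- modulo, instead of A's running offset reduced hop by hop (objective: alternative, same cost;
-- both Pythons mutate schedule_list in place and the final mutated state equals the returned
-- value inside Pre_).

-- ===== PORT A =====
-- schedule_list[switchid[k]][temp].append(pkt), Python index semantics (negative from the end)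
def gridAppend (g : List (List (List String))) (r s : Int) (pkt : String) : List (List (List String)) :=
  let row := PySem.List.pyGetD g r []
  PySem.List.pySetD g r (PySem.List.pySetD row s (PySem.List.pyGetD row s [] ++ [pkt]))

def enter_schedule_list (through_slot : List Int) (offset : Int) (slotnum : Int) (flownum : Int) (pktnum : Int) (pkthop : Int) (flow_name : List String) (schedule_list : List (List (List String))) (switchid : List Int) : List (List (List String)) :=
  (PySem.List.pyRange 0 pktnum 1).foldl (fun sl j =>
    let pkt := PySem.List.pyGetD flow_name flownum "" ++ "." ++ PySem.Int.toStr j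
    let off := PySem.Int.mod (offset + j * pkthop) slotnum
    ((PySem.List.pyRange 0 (through_slot.length : Int) 1).foldl
        (fun (st : List (List (List String)) × Int) k =>
          let temp := PySem.Int.mod (st.2 + PySem.List.pyGetD through_slot k 0) slotnum
          (gridAppend st.1 (PySem.List.pyGetD switchid k 0) temp pkt, temp))
        (sl, off)).1)
    schedule_list

-- ===== PORT B =====
def enter_schedule_list_alt (through_slot : List Int) (offset : Int) (slotnum : Int) (flownum : Int) (pktnum : Int) (pkthop : Int) (flow_name : List String) (schedule_list : List (List (List String))) (switchid : List Int) : List (List (List String)) :=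
  let cum : List Int :=
    (through_slot.foldl (fun (st : List Int × Int) hop => (st.1 ++ [st.2 + hop], st.2 + hop)) ([], 0)).1
  (PySem.List.pyRange 0 pktnum 1).foldl (fun sl j =>
    let pkt := PySem.List.pyGetD flow_name flownum "" ++ "." ++ PySem.Int.toStr j
    let base := offset + j * pkthop
    (PySem.List.enumerate cum 0).foldl (fun sl2 kc =>
      gridAppend sl2 (PySem.List.pyGetD switchid kc.1 0)
        (PySem.Int.mod (base + kc.2) slotnum) pkt) sl)
    schedule_list

-- ===== PRECONDITION & SPEC =====
-- Pre_ admits exactly the runs that schedule nothing (pktnum ≤ 0) or stay on the natural domain: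
-- a positive slotnum, valid indices everywhere A indexes, and every targeted switch row holding at
-- least slotnum slots.  It thereby excludes inputs where A raises, and also corners where A returns
-- only via accidents of shape: a negative slotnum (negative-index wraparound into the rows) and
-- ragged rows shorter than slotnum that the reached slots happen to miss.
def Pre_enter_schedule_list (through_slot : List Int) (offset : Int) (slotnum : Int) (flownum : Int) (pktnum : Int) (pkthop : Int) (flow_name : List String) (schedule_list : List (List (List String))) (switchid : List Int) : Prop :=
  pktnum ≤ 0 ∨
  (0 < slotnum ∧ PySem.Raise.InRange flow_name.length flownum ∧
   through_slot.length ≤ switchid.length ∧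
   ∀ k < through_slot.length,
     PySem.Raise.InRange schedule_list.length (switchid.getD k 0) ∧
     slotnum ≤ ((schedule_list.getD (PySem.Int.mod (switchid.getD k 0) (schedule_list.length : Int)).toNat []).length : Int))
instance (through_slot : List Int) (offset : Int) (slotnum : Int) (flownum : Int) (pktnum : Int) (pkthop : Int) (flow_name : List String) (schedule_list : List (List (List String))) (switchid : List Int) : Decidable (Pre_enter_schedule_list through_slot offset slotnum flownum pktnum pkthop flow_name schedule_list switchid) := by unfold Pre_enter_schedule_list; infer_instance

def pvWitness_enter_schedule_list : List Int × Int × Int × Int × Int × Int × List String × List (List (List String)) × List Int :=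
  ([1], 0, 2, 0, 1, 1, ["f0"], [[[], []], [[], []]], [0])

def Spec_enter_schedule_list (through_slot : List Int) (offset : Int) (slotnum : Int) (flownum : Int) (pktnum : Int) (pkthop : Int) (flow_name : List String) (schedule_list : List (List (List String))) (switchid : List Int) (out : List (List (List String))) : Prop := out = enter_schedule_list_alt through_slot offset slotnum flownum pktnum pkthop flow_name schedule_list switchid
instance (through_slot : List Int) (offset : Int) (slotnum : Int) (flownum : Int) (pktnum : Int) (pkthop : Int) (flow_name : List String) (schedule_list : List (List (List String))) (switchid : List Int) (out : List (List (List String))) : Decidable (Spec_enter_schedule_list through_slot offset slotnum flownum pktnum pkthop flow_name schedule_list switchid out) := by unfold Spec_enter_schedule_list; infer_instance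

-- ===== CLAIM (what is proved, stated in full; the proofs are below) =====
def Claim_equal_enter_schedule_list : Prop := ∀ (through_slot : List Int) (offset : Int) (slotnum : Int) (flownum : Int) (pktnum : Int) (pkthop : Int) (flow_name : List String) (schedule_list : List (List (List String))) (switchid : List Int), Dom_enter_schedule_list through_slot offset slotnum flownum pktnum pkthop flow_name schedule_list switchid → Pre_enter_schedule_list through_slot offset slotnum flownum pktnum pkthop flow_name schedule_list switchid → Spec_enter_schedule_list through_slot offset slotnum flownum pktnum pkthop flow_name schedule_list switchid (enter_schedule_list through_slot offset slotnum flownum pktnum pkthop flow_name schedule_list switchid)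

-- ===== LEMMAS AND PROOFS =====

theorem pvWitness_ok :
    Dom_enter_schedule_list pvWitness_enter_schedule_list.1 pvWitness_enter_schedule_list.2.1 pvWitness_enter_schedule_list.2.2.1 pvWitness_enter_schedule_list.2.2.2.1 pvWitness_enter_schedule_list.2.2.2.2.1 pvWitness_enter_schedule_list.2.2.2.2.2.1 pvWitness_enter_schedule_list.2.2.2.2.2.2.1 pvWitness_enter_schedule_list.2.2.2.2.2.2.2.1 pvWitness_enter_schedule_list.2.2.2.2.2.2.2.2 ∧
    Pre_enter_schedule_list pvWitness_enter_schedule_list.1 pvWitness_enter_schedule_list.2.1 pvWitness_enter_schedule_list.2.2.1 pvWitness_enter_schedule_list.2.2.2.1 pvWitness_enter_schedule_list.2.2.2.2.1 pvWitness_enter_schedule_list.2.2.2.2.2.1 pvWitness_enter_schedule_list.2.2.2.2.2.2.1 pvWitness_enter_schedule_list.2.2.2.2.2.2.2.1 pvWitness_enter_schedule_list.2.2.2.2.2.2.2.2 := by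
  constructor <;> decide

-- Python's %: ((a % m) + b) % m = (a + b) % m for every m (PySem.Int.mod is Int.fmod)
theorem pvModAdd (a b m : Int) :
    PySem.Int.mod (PySem.Int.mod a m + b) m = PySem.Int.mod (a + b) m :=
  Int.fmod_add_fmod a m b

theorem pvSumTakeSucc (l : List Int) (s : Nat) (h : s < l.length) :
    (l.take (s+1)).sum = (l.take s).sum + l.getD s 0 := by
  rw [List.take_add_one, List.sum_append, List.getElem?_eq_getElem h]
  simp [List.getD_eq_getElem?_getD, List.getElem?_eq_getElem h]

-- A's inner loop, flattened: the running temp after k steps is the closed-form slot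
theorem pvInnerA (ts sw : List Int) (slotnum : Int) (pkt : String) (c : Int) :
    ∀ (n s : Nat) (g : List (List (List String))), s + n = ts.length →
    ((List.range' s n).foldl
       (fun (st : List (List (List String)) × Int) (k : Nat) =>
          (gridAppend st.1 (PySem.List.pyGetD sw ((k : Nat) : Int) 0)
             (PySem.Int.mod (st.2 + PySem.List.pyGetD ts ((k : Nat) : Int) 0) slotnum) pkt,
           PySem.Int.mod (st.2 + PySem.List.pyGetD ts ((k : Nat) : Int) 0) slotnum))
       (g, PySem.Int.mod (c + (ts.take s).sum) slotnum)).1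
    = (List.range' s n).foldl
        (fun g2 (k : Nat) =>
          gridAppend g2 (PySem.List.pyGetD sw ((k : Nat) : Int) 0)
            (PySem.Int.mod (c + (ts.take (k+1)).sum) slotnum) pkt) g := by
  intro n
  induction n with
  | zero => intro s g _; simp
  | succ n ih =>
    intro s g hlen
    have hsl : s < ts.length := by omega
    have ht : PySem.Int.mod (PySem.Int.mod (c + (ts.take s).sum) slotnum + PySem.List.pyGetD ts ((s : Nat) : Int) 0) slotnum
        = PySem.Int.mod (c + (ts.take (s+1)).sum) slotnum := by
      rw [pvModAdd, PySem.List.pyGetD_natCast, pvSumTakeSucc ts s hsl, add_assoc]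
    rw [List.range'_succ, List.foldl_cons, List.foldl_cons]
    show ((List.range' (s+1) n).foldl _
        (gridAppend g (PySem.List.pyGetD sw ((s : Nat) : Int) 0)
           (PySem.Int.mod (PySem.Int.mod (c + (ts.take s).sum) slotnum + PySem.List.pyGetD ts ((s : Nat) : Int) 0) slotnum) pkt,
         PySem.Int.mod (PySem.Int.mod (c + (ts.take s).sum) slotnum + PySem.List.pyGetD ts ((s : Nat) : Int) 0) slotnum)).1 = _
    rw [ht]
    exact ih (s+1) _ (by omega)

-- B's prefix-sum accumulator, in closed form
theorem pvCumFold : ∀ (l : List Int) (acc : List Int) (t : Int),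
    (l.foldl (fun (st : List Int × Int) hop => (st.1 ++ [st.2 + hop], st.2 + hop)) (acc, t)).1
      = acc ++ (List.range l.length).map (fun k => t + (l.take (k+1)).sum) := by
  intro l
  induction l with
  | nil => intro acc t; simp
  | cons d l ih =>
    intro acc t
    rw [List.foldl_cons]
    show (l.foldl _ (acc ++ [t + d], t + d)).1 = _
    rw [ih (acc ++ [t + d]) (t + d)]
    rw [List.length_cons, List.range_succ_eq_map]
    simp only [List.map_cons, List.map_map, Function.comp_def, List.take_succ_cons,
      List.sum_cons, List.take_zero, List.sum_nil, add_zero, List.append_assoc,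
      List.singleton_append, add_assoc]

theorem pvCumGet (ts : List Int) (k : Nat) (h : k < ts.length) :
    PySem.List.pyGetD
      ((ts.foldl (fun (st : List Int × Int) hop => (st.1 ++ [st.2 + hop], st.2 + hop)) ([], 0)).1)
      (k : Int) 0 = (ts.take (k+1)).sum := by
  rw [PySem.List.pyGetD_natCast, pvCumFold ts [] 0, List.nil_append]
  simp [List.getD_eq_getElem?_getD, h]

theorem pvCumLen (ts : List Int) :
    ((ts.foldl (fun (st : List Int × Int) hop => (st.1 ++ [st.2 + hop], st.2 + hop)) ([], 0)).1).length
      = ts.length := by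
  rw [pvCumFold ts [] 0]; simp

-- ===== VERDICT (by name: the statement is the Claim_ definition above) =====
theorem enter_schedule_list_spec : Claim_equal_enter_schedule_list := by
  intro ts offset slotnum flownum pktnum pkthop fn gr sw _hdom _hpre
  unfold Spec_enter_schedule_list enter_schedule_list enter_schedule_list_alt
  apply PySem.List.foldl_congr_mem
  intro acc j _
  -- A's iteration for packet j
  have hA :
      (let pkt := PySem.List.pyGetD fn flownum "" ++ "." ++ PySem.Int.toStr j
       let off := PySem.Int.mod (offset + j * pkthop) slotnum
       ((PySem.List.pyRange 0 (ts.length : Int) 1).foldl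
          (fun (st : List (List (List String)) × Int) k =>
            let temp := PySem.Int.mod (st.2 + PySem.List.pyGetD ts k 0) slotnum
            (gridAppend st.1 (PySem.List.pyGetD sw k 0) temp pkt, temp))
          (acc, off)).1)
      = (List.range' 0 ts.length).foldl
          (fun g2 (k : Nat) =>
            gridAppend g2 (PySem.List.pyGetD sw ((k : Nat) : Int) 0)
              (PySem.Int.mod ((offset + j * pkthop) + (ts.take (k+1)).sum) slotnum)
              (PySem.List.pyGetD fn flownum "" ++ "." ++ PySem.Int.toStr j)) acc := by
    simp only [PySem.List.pyRange_zero_natCast, List.foldl_map, List.range_eq_range']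
    have h := pvInnerA ts sw slotnum
      (PySem.List.pyGetD fn flownum "" ++ "." ++ PySem.Int.toStr j)
      (offset + j * pkthop) ts.length 0 acc (by omega)
    simpa using h
  rw [hA]
  -- B's iteration for packet j
  rw [PySem.List.enumerate_eq_map_pyRange (d := 0), List.foldl_map]
  simp only [PySem.List.len]
  rw [pvCumLen, PySem.List.pyRange_zero_natCast, List.foldl_map, List.range_eq_range']
  apply PySem.List.foldl_congr_mem
  intro g2 k hk
  have hkK : k < ts.length := by
    have := List.mem_range'_1.mp hk; omega
  rw [pvCumGet ts k hkK, add_assoc]
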